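-- pv_equiv track=rewrite | github.com/fcriscuo/OntologyLoader | Neo4jFunctions/neo4j_utils.py | convert_selected_properties_to_neo4j_list
-- ===== SOURCE A (Python) =====
-- def convert_selected_properties_to_neo4j_list(data, keys):
--     """
--     Processes a dictionary by applying a function to specific keys and values.
--     Primary intent is to convert a list of strings to a list of quoted strings for use in a Cypher query.
--
--     Args:
--         data: The original dictionary.
--         keys: A list of keys to process.
--
--     Returns:
--         A new dictionary with the processed values.
--     """
--     new_data = {}
--     for key, value in data.items():
--         if key in keys:
--             new_data[key] = parse_to_quoted_neo4j_string_list(value)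
--         else:
--             new_data[key] = value
--     return new_data
--
-- def parse_to_quoted_neo4j_string_list(string, sep='|'):
--     if string:
--         list_ = [f'"{symbol}"' for symbol in string.split(sep)]
--         return f"[{', '.join(list_)}]"
--     else:
--         return "[]"
-- ===== SOURCE B (Python) =====
-- def convert_selected_properties_to_neo4j_list(data, keys):
--     new_data = dict(data)
--     for key in dict.fromkeys(keys):
--         if key in new_data:
--             new_data[key] = parse_to_quoted_neo4j_string_list(new_data[key])
--     return new_data
--
-- def parse_to_quoted_neo4j_string_list(string, sep='|'):
--     if string:
--         list_ = [f'"{symbol}"' for symbol in string.split(sep)]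
--         return f"[{', '.join(list_)}]"
--     else:
--         return "[]"
-- ===== Notes on version B (the rewrite author's own statement) =====
-- stated objective: faster
-- what changed: B makes a full shallow copy dict(data) first and then patches only the (deduplicated) target keys present in it, instead of A's branch-per-entry rebuild that linearly scans the keys list for every dict entry.
import Mathlib
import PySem

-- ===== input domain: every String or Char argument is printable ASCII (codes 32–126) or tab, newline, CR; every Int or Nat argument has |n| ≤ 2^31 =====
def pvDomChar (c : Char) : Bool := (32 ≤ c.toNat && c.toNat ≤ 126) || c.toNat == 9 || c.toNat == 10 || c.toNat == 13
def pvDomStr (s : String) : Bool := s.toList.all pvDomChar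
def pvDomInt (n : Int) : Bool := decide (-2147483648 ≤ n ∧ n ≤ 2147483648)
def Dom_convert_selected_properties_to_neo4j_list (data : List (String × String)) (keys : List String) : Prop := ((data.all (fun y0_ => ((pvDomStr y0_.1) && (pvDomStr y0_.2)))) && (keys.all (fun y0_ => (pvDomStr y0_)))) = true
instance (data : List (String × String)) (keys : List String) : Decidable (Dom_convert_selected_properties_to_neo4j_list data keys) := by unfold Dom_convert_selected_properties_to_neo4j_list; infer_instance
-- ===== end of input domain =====

-- B copies the dict first and patches only the (deduplicated) target keys present in it,
-- instead of A's branch-per-entry rebuild; return values proved equal on all inputs.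

-- ===== PORT A =====
-- shared helper: parse_to_quoted_neo4j_string_list(string) with default sep='|'
def pyParse (s : String) : String :=
  if s ≠ "" then
    -- s.split('|'): PySem.Chars.splitOn, exact since the separator "|" is nonempty
    let list_ := (PySem.Chars.splitOn s.toList "|".toList).map (fun symbol => "\"" ++ String.ofList symbol ++ "\"")
    "[" ++ PySem.Str.join ", " list_ ++ "]"
  else "[]"

def convert_selected_properties_to_neo4j_list (data : List (String × String)) (keys : List String) : List (String × String) :=
  -- new_data = {}; for key, value in data.items(): ...
  ((PySem.Dict.ofList data).items.foldl
    (fun nd p => if p.1 ∈ keys then nd.insert p.1 (pyParse p.2) else nd.insert p.1 p.2)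
    PySem.Dict.empty).items

-- ===== PORT B =====
def convert_selected_properties_to_neo4j_list_alt (data : List (String × String)) (keys : List String) : List (String × String) :=
  -- new_data = dict(data); for key in dict.fromkeys(keys): if key in new_data: new_data[key] = parse(new_data[key])
  ((PySem.List.dedup keys).foldl
    (fun d k => if d.contains k then d.insert k (pyParse (d.getD k "")) else d)
    (PySem.Dict.ofList data)).items

-- ===== PRECONDITION & SPEC =====
def Spec_convert_selected_properties_to_neo4j_list (data : List (String × String)) (keys : List String) (out : List (String × String)) : Prop := out = convert_selected_properties_to_neo4j_list_alt data keys
instance (data : List (String × String)) (keys : List String) (out : List (String × String)) : Decidable (Spec_convert_selected_properties_to_neo4j_list data keys out) := by unfold Spec_convert_selected_properties_to_neo4j_list; infer_instance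

-- ===== CLAIM (what is proved, stated in full; the proofs are below) =====
def Claim_equal_convert_selected_properties_to_neo4j_list : Prop := ∀ (data : List (String × String)) (keys : List String), Dom_convert_selected_properties_to_neo4j_list data keys → Spec_convert_selected_properties_to_neo4j_list data keys (convert_selected_properties_to_neo4j_list data keys)

-- ===== LEMMAS AND PROOFS =====

-- the per-entry patch both sides compute, as a function on items
def pvPatch (keys : List String) (p : String × String) : String × String :=
  if p.1 ∈ keys then (p.1, pyParse p.2) else p

theorem pvPatch_fst (keys : List String) (p : String × String) : (pvPatch keys p).1 = p.1 := by
  unfold pvPatch; split <;> rfl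

-- A-side: folding transformed inserts = map pvPatch over folding plain inserts
theorem pvA_fold (keys : List String) (l : List (String × String))
    (acc acc' : PySem.Dict String String) (h : acc'.items = acc.items.map (pvPatch keys)) :
    (l.foldl (fun nd p => if p.1 ∈ keys then nd.insert p.1 (pyParse p.2) else nd.insert p.1 p.2) acc').items
      = (l.foldl (fun d p => d.insert p.1 p.2) acc).items.map (pvPatch keys) := by
  induction l generalizing acc acc' with
  | nil => simpa using h
  | cons p l ih =>
    simp only [List.foldl_cons]
    apply ih
    have hkeys : acc'.keys = acc.keys := by
      show acc'.items.map Prod.fst = acc.items.map Prod.fst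
      rw [h, List.map_map]
      congr 1
      funext q
      exact pvPatch_fst keys q
    have hc : acc'.contains p.1 = acc.contains p.1 := by
      rw [PySem.Dict.contains_eq_decide_mem_keys, PySem.Dict.contains_eq_decide_mem_keys, hkeys]
    have hstep : (if p.1 ∈ keys then acc'.insert p.1 (pyParse p.2) else acc'.insert p.1 p.2)
        = acc'.insert p.1 (pvPatch keys p).2 := by
      unfold pvPatch; split <;> rfl
    rw [hstep]
    by_cases hcont : acc.contains p.1 = true
    · rw [PySem.Dict.items_insert_of_contains _ _ (by rw [hc]; exact hcont),
          PySem.Dict.items_insert_of_contains _ _ hcont, h,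
          List.map_map, List.map_map]
      apply List.map_congr_left
      intro q _
      by_cases hq : q.1 = p.1
      · simp only [Function.comp, pvPatch_fst, hq, beq_self_eq_true, if_true]
        unfold pvPatch
        split <;> rfl
      · simp only [Function.comp, pvPatch_fst]
        rw [if_neg (by simpa using hq), if_neg (by simpa using hq)]
    · rw [PySem.Dict.items_insert_of_not_contains _ _ (by rw [hc]; simpa using hcont),
          PySem.Dict.items_insert_of_not_contains _ _ (by simpa using hcont), h, List.map_append]
      congr 1
      simp only [List.map_cons, List.map_nil]
      congr 1
      unfold pvPatch
      split <;> rfl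

-- B-side: the patch loop over a nodup key list = map of the per-entry patch
theorem pvB_fold (S : List String) (d : PySem.Dict String String)
    (hnd : d.keys.Nodup) (hS : S.Nodup) :
    (S.foldl (fun d k => if d.contains k then d.insert k (pyParse (d.getD k "")) else d) d).items
      = d.items.map (pvPatch S) := by
  induction S generalizing d with
  | nil =>
    simp only [List.foldl_nil]
    symm
    apply List.map_id''
    intro p
    unfold pvPatch
    simp
  | cons k S ih =>
    simp only [List.foldl_cons]
    have hknS : k ∉ S := (List.nodup_cons.mp hS).1
    have hSnd : S.Nodup := (List.nodup_cons.mp hS).2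
    have hstep : (if d.contains k then d.insert k (pyParse (d.getD k "")) else d).items
        = d.items.map (pvPatch [k]) := by
      by_cases hc : d.contains k = true
      · rw [if_pos hc, PySem.Dict.items_insert_of_contains _ _ hc]
        apply List.map_congr_left
        intro q hq
        by_cases hqk : q.1 = k
        · rw [if_pos (by simpa using hqk)]
          unfold pvPatch
          rw [if_pos (by simp [hqk])]
          have hg : d.getD k "" = q.2 := by
            have := PySem.Dict.getD_of_mem_items (d := d) (k := q.1) (v := q.2) (by simpa using hq) hnd ""
            rwa [hqk] at this
          rw [hg, hqk]
        · rw [if_neg (by simpa using hqk)]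
          unfold pvPatch
          rw [if_neg (by simp [hqk])]
      · rw [if_neg (by simpa using hc)]
        have hid : ∀ q ∈ d.items, pvPatch [k] q = id q := by
          intro q hq
          unfold pvPatch
          by_cases hqk : q.1 = k
          · exfalso
            apply hc
            rw [PySem.Dict.contains_eq_decide_mem_keys]
            simp only [decide_eq_true_eq]
            rw [← hqk]
            exact List.mem_map_of_mem hq
          · rw [if_neg (by simp [hqk])]
            rfl
        symm
        rw [List.map_congr_left hid, List.map_id]
    have hkeys' : (if d.contains k then d.insert k (pyParse (d.getD k "")) else d).keys = d.keys := by
      by_cases hc : d.contains k = true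
      · rw [if_pos hc]
        exact PySem.Dict.keys_insert_of_contains _ _ hc
      · rw [if_neg (by simpa using hc)]
    rw [ih _ (by rw [hkeys']; exact hnd) hSnd, hstep, List.map_map]
    apply List.map_congr_left
    intro q _
    simp only [Function.comp]
    unfold pvPatch
    by_cases hqk : q.1 = k
    · simp [hqk, hknS]
    · by_cases hqS : q.1 ∈ S <;> simp [hqk, hqS]

-- rebuilding a dict from its own (nodup-keyed) items gives the same items back
theorem pvRebuild (d : PySem.Dict String String) (hnd : d.keys.Nodup) :
    (d.items.foldl (fun d' p => d'.insert p.1 p.2) PySem.Dict.empty).items = d.items := by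
  have h := PySem.Dict.items_foldl_insert_fresh (l := d.items) (k := Prod.fst) (v := Prod.snd)
    (d := PySem.Dict.empty) (by intro a _; exact PySem.Dict.contains_empty _) (by exact hnd)
  simpa using h

theorem pvPatch_dedup (keys : List String) (p : String × String) :
    pvPatch (PySem.List.dedup keys) p = pvPatch keys p := by
  unfold pvPatch
  by_cases h : p.1 ∈ keys
  · rw [if_pos ((PySem.List.mem_dedup _ _).mpr h), if_pos h]
  · rw [if_neg (fun hc => h ((PySem.List.mem_dedup _ _).mp hc)), if_neg h]

-- ===== VERDICT (by name: the statement is the Claim_ definition above) =====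
theorem convert_selected_properties_to_neo4j_list_spec : Claim_equal_convert_selected_properties_to_neo4j_list := by
  intro data keys _
  show convert_selected_properties_to_neo4j_list data keys = convert_selected_properties_to_neo4j_list_alt data keys
  unfold convert_selected_properties_to_neo4j_list convert_selected_properties_to_neo4j_list_alt
  have hnd : (PySem.Dict.ofList data).keys.Nodup := PySem.Dict.nodup_keys_ofList data
  rw [pvA_fold keys ((PySem.Dict.ofList data).items) PySem.Dict.empty PySem.Dict.empty rfl,
      pvRebuild _ hnd,
      pvB_fold (PySem.List.dedup keys) _ hnd (PySem.List.nodup_dedup keys)]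
  apply List.map_congr_left
  intro p _
  rw [pvPatch_dedup]
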